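-- pv_equiv track=rewrite | github.com/A-A020/APS106 | Lab 7/lab7.py | find_unbalanced_atoms
-- ===== SOURCE A (Python) =====
-- def find_unbalanced_atoms(reactant_atoms, product_atoms):
--     """
--     (Dict,Dict) -> Set
--
--     Determine if reactant_atoms and product_atoms contain equal key-value
--     pairs. The keys of both dictionaries are strings representing the
--     chemical abbreviation, the value is an integer representing the number
--     of atoms of that element on one side of a chemical equation.
--
--     Return a set containing all the elements that are not balanced between
--     the two dictionaries.
--
--     >>> find_unbalanced_atoms({"H" : 2, "Cl" : 2, "Na" : 2}, {"H" : 2, "Na" : 1, "Cl" : 2})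
--     {'Na'}
--
--     >>> find_unbalanced_atoms({"H" : 2, "Cl" : 2, "Na" : 2}, {"H" : 2, "Na" : 2, "Cl" : 2})
--     set()
--
--     >>> find_unbalanced_atoms({"H" : 2, "Cl" : 2, "Na" : 2}, {"H" : 2, "F" : 2, "Cl" : 2})
--     {'F', 'Na'}
--     """
--     if reactant_atoms == product_atoms:
--         return set()
--     else:
--         empty = set()
--         diff1 = set(reactant_atoms) - set(product_atoms)
--         diff2 = set(product_atoms) - set(reactant_atoms)
--         empty.update(diff1)
--         empty.update(diff2)
--         for key in reactant_atoms:
--             if (key in product_atoms and reactant_atoms[key] != product_atoms[key]):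
--                 empty.add(key)
--                 if ((key in reactant_atoms) and (key not in product_atoms)):
--                     empty.add(key)
--         return (empty)
-- ===== SOURCE B (Python) =====
-- _ABSENT = object()  # unique sentinel: no real atom count can ever be it
--
-- def find_unbalanced_atoms(reactant_atoms, product_atoms):
--     # Destructive matching: consume a working copy of product_atoms by popping
--     # each reactant key; whatever survives the sweep is product-only.
--     remaining = dict(product_atoms)
--     only_reactant = []
--     mismatched = []
--     for key, count in reactant_atoms.items():
--         got = remaining.pop(key, _ABSENT)
--         if got is _ABSENT:
--             only_reactant.append(key)
--         elif got != count:
--             mismatched.append(key)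
--     return set(only_reactant + list(remaining) + mismatched)
-- ===== Notes on version B (the rewrite author's own statement) =====
-- stated objective: alternative
-- what changed: A computes three independent global set computations (dict-equality fast path, two whole-key-set differences, then a mutating add-loop over shared keys); B instead destructively matches: it pops each reactant key out of a working copy of the product dict in one sweep, classifying it as missing or mismatched, and the keys that survive the sweep are the product-only ones, so no set difference and no reactant-membership test over product keys exists at all.
import Mathlib
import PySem

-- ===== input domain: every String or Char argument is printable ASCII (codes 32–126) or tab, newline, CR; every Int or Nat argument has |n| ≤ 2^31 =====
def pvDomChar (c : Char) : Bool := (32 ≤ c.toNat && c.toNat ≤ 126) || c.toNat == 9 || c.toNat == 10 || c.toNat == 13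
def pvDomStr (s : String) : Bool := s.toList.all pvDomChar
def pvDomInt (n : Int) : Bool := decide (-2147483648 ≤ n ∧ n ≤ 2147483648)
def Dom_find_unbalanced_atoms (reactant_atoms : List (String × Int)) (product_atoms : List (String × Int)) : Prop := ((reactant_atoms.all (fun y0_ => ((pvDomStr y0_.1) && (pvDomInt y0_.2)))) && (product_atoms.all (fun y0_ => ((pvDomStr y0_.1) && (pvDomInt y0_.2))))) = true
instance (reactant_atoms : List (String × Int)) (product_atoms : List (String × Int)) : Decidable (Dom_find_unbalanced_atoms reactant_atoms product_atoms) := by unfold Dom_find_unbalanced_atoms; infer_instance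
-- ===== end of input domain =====

-- B replaces A's dict-equality fast path, set differences and mutating add-loop by destructive
-- matching: one sweep popping reactant keys from a copy of the product dict; the survivors are
-- the product-only keys (alternative decomposition, same cost). B mutates only its private copy.


-- ===== PORT A =====
-- Python 'dict ==': same key set and, for every key, the same value (insertion order ignored)
def pyDictEq (d e : PySem.Dict String Int) : Bool :=
  PySem.Set.equal (PySem.Set.ofList d.keys) (PySem.Set.ofList e.keys) &&
  d.keys.all (fun k => d.get? k == e.get? k)

def find_unbalanced_atoms (reactant_atoms : List (String × Int)) (product_atoms : List (String × Int)) : List String :=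
  let dr : PySem.Dict String Int := PySem.Dict.mk reactant_atoms
  let dp : PySem.Dict String Int := PySem.Dict.mk product_atoms
  if pyDictEq dr dp then
    PySem.Set.empty
  else
    let empty : PySem.Set String := PySem.Set.empty
    let diff1 := PySem.Set.diff (PySem.Set.ofList dr.keys) (PySem.Set.ofList dp.keys)
    let diff2 := PySem.Set.diff (PySem.Set.ofList dp.keys) (PySem.Set.ofList dr.keys)
    let empty := PySem.Set.update empty diff1
    let empty := PySem.Set.update empty diff2
    dr.keys.foldl (fun s key =>
      if dp.contains key && decide (dr.get? key ≠ dp.get? key) then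
        let s := PySem.Set.add s key
        -- literal port of A's (dead) inner 'if key in reactant_atoms and key not in product_atoms'
        if dr.contains key && !dp.contains key then PySem.Set.add s key else s
      else s) empty

-- ===== PORT B =====
-- state = (remaining product dict, only_reactant list, mismatched list);
-- 'remaining.pop(key, _ABSENT)' is Dict.pop? (none = the _ABSENT branch)
def find_unbalanced_atoms_alt (reactant_atoms : List (String × Int)) (product_atoms : List (String × Int)) : List String :=
  let dr : PySem.Dict String Int := PySem.Dict.mk reactant_atoms
  let remaining : PySem.Dict String Int := PySem.Dict.mk product_atoms
  let st := dr.items.foldl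
    (fun (st : PySem.Dict String Int × List String × List String) kv =>
      match st.1.pop? kv.1 with
      | none => (st.1, st.2.1 ++ [kv.1], st.2.2)
      | some got => if got.1 ≠ kv.2 then (got.2, st.2.1, st.2.2 ++ [kv.1]) else (got.2, st.2.1, st.2.2))
    (remaining, [], [])
  PySem.Set.ofList (st.2.1 ++ st.1.keys ++ st.2.2)

-- ===== PRECONDITION & SPEC =====
-- Pre_ requires distinct keys in each association list: the Python arguments are dicts,
-- which cannot contain duplicate keys, so a duplicate-key list encodes no input A ever sees.
def Pre_find_unbalanced_atoms (reactant_atoms : List (String × Int)) (product_atoms : List (String × Int)) : Prop :=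
  (reactant_atoms.map (·.1)).Nodup ∧ (product_atoms.map (·.1)).Nodup
instance (reactant_atoms : List (String × Int)) (product_atoms : List (String × Int)) : Decidable (Pre_find_unbalanced_atoms reactant_atoms product_atoms) := by unfold Pre_find_unbalanced_atoms; infer_instance

def pvWitness_find_unbalanced_atoms : (List (String × Int)) × (List (String × Int)) :=
  ([("H", 2), ("Cl", 2), ("Na", 2)], [("H", 2), ("Na", 1), ("Cl", 2)])

def Spec_find_unbalanced_atoms (reactant_atoms : List (String × Int)) (product_atoms : List (String × Int)) (out : List String) : Prop := out = find_unbalanced_atoms_alt reactant_atoms product_atoms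
instance (reactant_atoms : List (String × Int)) (product_atoms : List (String × Int)) (out : List String) : Decidable (Spec_find_unbalanced_atoms reactant_atoms product_atoms out) := by unfold Spec_find_unbalanced_atoms; infer_instance

-- ===== CLAIM (what is proved, stated in full; the proofs are below) =====
def Claim_equal_find_unbalanced_atoms : Prop := ∀ (reactant_atoms : List (String × Int)) (product_atoms : List (String × Int)), Dom_find_unbalanced_atoms reactant_atoms product_atoms → Pre_find_unbalanced_atoms reactant_atoms product_atoms → Spec_find_unbalanced_atoms reactant_atoms product_atoms (find_unbalanced_atoms reactant_atoms product_atoms)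

-- ===== LEMMAS AND PROOFS =====

-- the common normal form both ports reach: reactant-only keys ++ product-only keys ++ value-mismatch keys
def tgt (r p : List (String × Int)) : List String :=
  let dr : PySem.Dict String Int := PySem.Dict.mk r
  let dp : PySem.Dict String Int := PySem.Dict.mk p
  ((r.map (·.1)).filter (fun k => !dp.contains k))
    ++ ((p.map (·.1)).filter (fun k => !dr.contains k))
    ++ ((r.map (·.1)).filter (fun k => dp.contains k && decide (dr.get? k ≠ dp.get? k)))

lemma set_contains_keys (d : PySem.Dict String Int) (k : String) :
    PySem.Set.contains (PySem.Set.ofList d.keys) k = d.contains k := by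
  by_cases h : k ∈ d.keys
  · rw [(PySem.Set.contains_iff _ _).mpr ((PySem.Set.mem_ofList _ _).mpr h),
      (PySem.Dict.contains_iff_mem_keys _ _).mpr h]
  · have h1 : PySem.Set.contains (PySem.Set.ofList d.keys) k = false :=
      Bool.eq_false_iff.mpr
        (fun hc => h ((PySem.Set.mem_ofList _ _).mp ((PySem.Set.contains_iff _ _).mp hc)))
    have h2 : d.contains k = false :=
      Bool.eq_false_iff.mpr (fun hc => h ((PySem.Dict.contains_iff_mem_keys _ _).mp hc))
    rw [h1, h2]

-- find? is blind to entries whose key is the (different) erased one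
lemma find?_filter_ne (l : List (String × Int)) (k k' : String) (h : k' ≠ k) :
    (l.filter (fun p => !(p.1 == k))).find? (fun p => p.1 == k')
      = l.find? (fun p => p.1 == k') := by
  induction l with
  | nil => rfl
  | cons q rest ih =>
    by_cases hk : q.1 = k
    · have hne : (q.1 == k') = false := by
        simp [hk]; exact fun he => h he.symm
      rw [List.filter_cons, if_neg (by simp [hk]), List.find?_cons, hne, ih]
    · rw [List.filter_cons, if_pos (by simp [hk]), List.find?_cons, List.find?_cons]
      by_cases hk' : q.1 = k'
      · simp [hk']
      · simp [ih]

lemma get?_erase_of_ne (d : PySem.Dict String Int) (k k' : String) (h : k' ≠ k) :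
    (d.erase k).get? k' = d.get? k' := by
  show Option.map _ (List.find? _ (List.filter _ d.items)) = Option.map _ (List.find? _ d.items)
  rw [find?_filter_ne d.items k k' h]

lemma contains_erase_of_ne (d : PySem.Dict String Int) (k k' : String) (h : k' ≠ k) :
    (d.erase k).contains k' = d.contains k' := by
  rw [PySem.Dict.contains_eq_isSome_get?, PySem.Dict.contains_eq_isSome_get?,
    get?_erase_of_ne d k k' h]

lemma erase_of_get?_none (d : PySem.Dict String Int) (k : String)
    (h : d.get? k = none) : d.erase k = d := by
  apply PySem.Dict.ext
  show d.items.filter (fun p => !(p.1 == k)) = d.items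
  have hf : d.items.find? (fun p => p.1 == k) = none := by
    have : Option.map (fun x : String × Int => x.2) (d.items.find? (fun p => p.1 == k)) = none := h
    exact Option.map_eq_none_iff.mp this
  refine List.filter_eq_self.mpr (fun p hp => ?_)
  have := List.find?_eq_none.mp hf p hp
  simpa using this

lemma keys_erase (d : PySem.Dict String Int) (k : String) :
    (d.erase k).keys = d.keys.filter (fun x => !(x == k)) := by
  show (d.items.filter (fun p => !(p.1 == k))).map (·.1)
      = (d.items.map (·.1)).filter (fun x => !(x == k))
  rw [List.filter_map]
  rfl

lemma keys_foldl_erase (pairs : List (String × Int)) (d : PySem.Dict String Int) :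
    (pairs.foldl (fun e kv => e.erase kv.1) d).keys
      = d.keys.filter (fun k => !((pairs.map (·.1)).contains k)) := by
  induction pairs generalizing d with
  | nil => simp
  | cons kv rest ih =>
    rw [List.foldl_cons, ih, keys_erase, List.filter_filter]
    refine List.filter_congr (fun k _ => ?_)
    by_cases h1 : k = kv.1 <;> simp [h1, Bool.and_comm]

-- the sweep's invariant: leftover dict, missing keys, mismatched keys
lemma foldB (pairs : List (String × Int)) (d : PySem.Dict String Int) (as bs : List String)
    (hnd : (pairs.map (·.1)).Nodup) :
    pairs.foldl
      (fun (st : PySem.Dict String Int × List String × List String) kv =>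
        match st.1.pop? kv.1 with
        | none => (st.1, st.2.1 ++ [kv.1], st.2.2)
        | some got => if got.1 ≠ kv.2 then (got.2, st.2.1, st.2.2 ++ [kv.1]) else (got.2, st.2.1, st.2.2))
      (d, as, bs)
    = (pairs.foldl (fun e kv => e.erase kv.1) d,
       as ++ (pairs.filter (fun kv => !d.contains kv.1)).map (·.1),
       bs ++ (pairs.filter (fun kv =>
          match d.get? kv.1 with
          | none => false
          | some v => decide (v ≠ kv.2))).map (·.1)) := by
  induction pairs generalizing d as bs with
  | nil => simp
  | cons kv rest ih =>
    have hnd' : (rest.map (·.1)).Nodup := (List.nodup_cons.mp hnd).2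
    have hfresh : kv.1 ∉ rest.map (·.1) := (List.nodup_cons.mp hnd).1
    have hcongr_contains : ∀ kv' ∈ rest, (d.erase kv.1).contains kv'.1 = d.contains kv'.1 := by
      intro kv' hkv'
      exact contains_erase_of_ne d kv.1 kv'.1
        (fun he => hfresh (he ▸ List.mem_map_of_mem hkv'))
    have hcongr_get : ∀ kv' ∈ rest, (d.erase kv.1).get? kv'.1 = d.get? kv'.1 := by
      intro kv' hkv'
      exact get?_erase_of_ne d kv.1 kv'.1
        (fun he => hfresh (he ▸ List.mem_map_of_mem hkv'))
    cases hg : d.get? kv.1 with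
    | none =>
      have hpop : PySem.Dict.pop? d kv.1 = none := by
        show Option.map _ (d.get? kv.1) = none
        rw [hg]; rfl
      have hcont : d.contains kv.1 = false := by
        rw [PySem.Dict.contains_eq_isSome_get?, hg]; rfl
      rw [List.foldl_cons, List.foldl_cons, List.filter_cons, List.filter_cons]
      simp only [hpop]
      rw [ih (d := d) (as := as ++ [kv.1]) (bs := bs) hnd']
      rw [erase_of_get?_none d kv.1 hg]
      simp [hcont, hg]
    | some v =>
      have hpop : PySem.Dict.pop? d kv.1 = some (v, d.erase kv.1) := by
        show Option.map _ (d.get? kv.1) = _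
        rw [hg]; rfl
      have hcont : d.contains kv.1 = true := by
        rw [PySem.Dict.contains_eq_isSome_get?, hg]; rfl
      rw [List.foldl_cons, List.foldl_cons, List.filter_cons, List.filter_cons]
      simp only [hpop]
      have hfr : (rest.filter (fun kv' => !(d.erase kv.1).contains kv'.1))
          = rest.filter (fun kv' => !d.contains kv'.1) :=
        List.filter_congr (fun kv' h => by rw [hcongr_contains kv' h])
      have hfg : (rest.filter (fun kv' =>
            match (d.erase kv.1).get? kv'.1 with
            | none => false
            | some w => decide (w ≠ kv'.2)))
          = rest.filter (fun kv' =>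
            match d.get? kv'.1 with
            | none => false
            | some w => decide (w ≠ kv'.2)) :=
        List.filter_congr (fun kv' h => by rw [hcongr_get kv' h])
      by_cases hv : v = kv.2
      · rw [if_neg (by simp [hv])]
        rw [ih (d := d.erase kv.1) (as := as) (bs := bs) hnd', hfr, hfg]
        simp [hcont, hg, hv]
      · rw [if_pos hv]
        rw [ih (d := d.erase kv.1) (as := as) (bs := bs ++ [kv.1]) hnd', hfr, hfg]
        simp [hcont, hg, hv]

lemma B_eq_tgt (r p : List (String × Int))
    (hr : (r.map (·.1)).Nodup) (hp : (p.map (·.1)).Nodup) :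
    find_unbalanced_atoms_alt r p = tgt r p := by
  unfold find_unbalanced_atoms_alt tgt
  simp only []
  set dr : PySem.Dict String Int := PySem.Dict.mk r with hdr
  set dp : PySem.Dict String Int := PySem.Dict.mk p with hdp
  have hitems : dr.items = r := rfl
  have hkeysr : dr.keys = r.map (·.1) := rfl
  have hkeysp : dp.keys = p.map (·.1) := rfl
  rw [foldB r dp [] [] hr]
  set L1 := (r.map (·.1)).filter (fun k => !dp.contains k) with hL1
  set L2 := (p.map (·.1)).filter (fun k => !dr.contains k) with hL2
  set L3 := (r.map (·.1)).filter
      (fun k => dp.contains k && decide (dr.get? k ≠ dp.get? k)) with hL3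
  have e1 : (r.filter (fun kv => !dp.contains kv.1)).map (·.1) = L1 := by
    rw [hL1, List.filter_map]
    rfl
  have e2 : (r.foldl (fun e kv => e.erase kv.1) dp).keys = L2 := by
    rw [keys_foldl_erase, hkeysp, hL2]
    refine List.filter_congr (fun k _ => ?_)
    congr 1
    rw [PySem.Dict.contains_eq_decide_mem_keys, hkeysr]
    by_cases h : k ∈ r.map (·.1) <;> simp [h]
  have e3 : (r.filter (fun kv =>
      match dp.get? kv.1 with
      | none => false
      | some v => decide (v ≠ kv.2))).map (·.1) = L3 := by
    have hpt : r.filter (fun kv =>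
        match dp.get? kv.1 with
        | none => false
        | some v => decide (v ≠ kv.2))
        = r.filter (fun kv => dp.contains kv.1 && decide (dr.get? kv.1 ≠ dp.get? kv.1)) := by
      apply List.filter_congr
      intro kv hkv
      have hget : dr.get? kv.1 = some kv.2 :=
        PySem.Dict.get?_of_mem_items _ (by rw [hitems]; exact hkv) (by rw [hkeysr]; exact hr)
      rw [PySem.Dict.contains_eq_isSome_get?, hget]
      cases h : dp.get? kv.1 with
      | none => rfl
      | some v => by_cases hv : v = kv.2 <;> simp [hv, eq_comm]
    rw [hpt, hL3, List.filter_map]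
    rfl
  rw [e1, e2, e3, List.nil_append, List.nil_append]
  -- set() of the already-duplicate-free concatenation L1 ++ L2 ++ L3 is itself
  have hmemr : ∀ k, k ∈ r.map (·.1) → dr.contains k = true :=
    fun k hk => (PySem.Dict.contains_iff_mem_keys _ _).mpr (by rw [hkeysr]; exact hk)
  have hmemp : ∀ k, k ∈ p.map (·.1) → dp.contains k = true :=
    fun k hk => (PySem.Dict.contains_iff_mem_keys _ _).mpr (by rw [hkeysp]; exact hk)
  apply PySem.Set.ofList_eq_self_of_nodup
  rw [List.append_assoc, List.nodup_append]
  refine ⟨hr.filter _, ?_, ?_⟩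
  · rw [List.nodup_append]
    refine ⟨hp.filter _, hr.filter _, fun k hk2 b hk3 heq => ?_⟩
    subst heq
    rcases List.mem_filter.mp hk2 with ⟨_, hknr⟩
    rcases List.mem_filter.mp hk3 with ⟨hk3r, _⟩
    rw [hmemr k hk3r] at hknr
    exact absurd hknr (by simp)
  · intro k hk1 b hk23 heq
    subst heq
    rcases List.mem_filter.mp hk1 with ⟨_, hknp⟩
    rcases List.mem_append.mp hk23 with hk2 | hk3
    · rcases List.mem_filter.mp hk2 with ⟨hk2p, _⟩
      rw [hmemp k hk2p] at hknp
      exact absurd hknp (by simp)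
    · rcases List.mem_filter.mp hk3 with ⟨_, hcond⟩
      have hcond' : (dp.contains k && decide (dr.get? k ≠ dp.get? k)) = true := hcond
      rw [((Bool.and_eq_true _ _).mp hcond').1] at hknp
      exact absurd hknp (by simp)

lemma foldA (dr dp : PySem.Dict String Int) (keys : List String) :
    ∀ (s : List String), keys.Nodup →
    (∀ k ∈ keys, (dp.contains k && decide (dr.get? k ≠ dp.get? k)) = true → k ∉ s) →
    keys.foldl (fun s key =>
        if dp.contains key && decide (dr.get? key ≠ dp.get? key) then
          let s := PySem.Set.add s key
          if dr.contains key && !dp.contains key then PySem.Set.add s key else s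
        else s) s
    = s ++ keys.filter (fun k => dp.contains k && decide (dr.get? k ≠ dp.get? k)) := by
  induction keys with
  | nil => intro s _ _; simp
  | cons k rest ih =>
    intro s hnd hfresh
    rw [List.foldl_cons, List.filter_cons]
    by_cases hc : (dp.contains k && decide (dr.get? k ≠ dp.get? k)) = true
    · have hkp : dp.contains k = true := ((Bool.and_eq_true _ _).mp hc).1
      have hnot : k ∉ s := hfresh k List.mem_cons_self hc
      rw [if_pos hc]
      simp only [hkp, Bool.not_true, Bool.and_false, Bool.false_eq_true, if_false]
      rw [PySem.Set.add_of_not_mem hnot]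
      rw [ih (s ++ [k]) hnd.of_cons (fun k' hk' hck' hmem => by
        rcases List.mem_append.mp hmem with hmem | hmem
        · exact hfresh k' (List.mem_cons_of_mem _ hk') hck' hmem
        · rcases List.mem_singleton.mp hmem with rfl
          exact (List.nodup_cons.mp hnd).1 hk')]
      rw [((Bool.and_eq_true _ _).mp hc).2]
      simp
    · rw [if_neg hc, eq_false_of_ne_true hc]
      simp only [Bool.false_eq_true, if_false]
      exact ih s hnd.of_cons (fun k' hk' hck' => hfresh k' (List.mem_cons_of_mem _ hk') hck')

lemma A_eq_tgt (r p : List (String × Int))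
    (hr : (r.map (·.1)).Nodup) (hp : (p.map (·.1)).Nodup) :
    find_unbalanced_atoms r p = tgt r p := by
  unfold find_unbalanced_atoms tgt
  simp only []
  set dr : PySem.Dict String Int := PySem.Dict.mk r with hdr
  set dp : PySem.Dict String Int := PySem.Dict.mk p with hdp
  have hkeysr : dr.keys = r.map (·.1) := rfl
  have hkeysp : dp.keys = p.map (·.1) := rfl
  set L1 := (r.map (·.1)).filter (fun k => !dp.contains k) with hL1
  set L2 := (p.map (·.1)).filter (fun k => !dr.contains k) with hL2
  set L3 := (r.map (·.1)).filter
      (fun k => dp.contains k && decide (dr.get? k ≠ dp.get? k)) with hL3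
  have hd1 : PySem.Set.diff (PySem.Set.ofList dr.keys) (PySem.Set.ofList dp.keys) = L1 := by
    show (PySem.Set.ofList dr.keys).filter
        (fun k => !PySem.Set.contains (PySem.Set.ofList dp.keys) k) = L1
    have hnodr : dr.keys.Nodup := by rw [hkeysr]; exact hr
    rw [PySem.Set.ofList_eq_self_of_nodup _ hnodr, hkeysr, hL1]
    exact List.filter_congr (fun k _ => by rw [set_contains_keys])
  have hd2 : PySem.Set.diff (PySem.Set.ofList dp.keys) (PySem.Set.ofList dr.keys) = L2 := by
    show (PySem.Set.ofList dp.keys).filter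
        (fun k => !PySem.Set.contains (PySem.Set.ofList dr.keys) k) = L2
    have hnodp : dp.keys.Nodup := by rw [hkeysp]; exact hp
    rw [PySem.Set.ofList_eq_self_of_nodup _ hnodp, hkeysp, hL2]
    exact List.filter_congr (fun k _ => by rw [set_contains_keys])
  by_cases heq : pyDictEq dr dp = true
  · rw [if_pos heq]
    unfold pyDictEq at heq
    rcases (Bool.and_eq_true _ _).mp heq with ⟨hks, hvs⟩
    have hkmem : ∀ k, k ∈ r.map (·.1) ↔ k ∈ p.map (·.1) := by
      intro k
      have h := ((PySem.Set.equal_iff _ _).mp hks) k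
      rw [PySem.Set.mem_ofList, PySem.Set.mem_ofList, hkeysr, hkeysp] at h
      exact h
    have hval : ∀ k ∈ r.map (·.1), dr.get? k = dp.get? k := fun k hk =>
      beq_iff_eq.mp (List.all_eq_true.mp hvs k (by rw [hkeysr]; exact hk))
    have hL1e : L1 = [] := by
      rw [hL1]
      refine List.filter_eq_nil_iff.mpr (fun k hk => ?_)
      rw [(PySem.Dict.contains_iff_mem_keys _ _).mpr (by rw [hkeysp]; exact (hkmem k).mp hk)]
      simp
    have hL2e : L2 = [] := by
      rw [hL2]
      refine List.filter_eq_nil_iff.mpr (fun k hk => ?_)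
      rw [(PySem.Dict.contains_iff_mem_keys _ _).mpr (by rw [hkeysr]; exact (hkmem k).mpr hk)]
      simp
    have hL3e : L3 = [] := by
      rw [hL3]
      refine List.filter_eq_nil_iff.mpr (fun k hk => ?_)
      rw [hval k hk]
      simp
    rw [hL1e, hL2e, hL3e]
    rfl
  · rw [if_neg heq, hd1, hd2]
    have hupd1 : PySem.Set.update PySem.Set.empty L1 = L1 := by
      show PySem.Set.update ([] : PySem.Set String) L1 = L1
      rw [PySem.Set.update_nil_left]
      exact PySem.Set.ofList_eq_self_of_nodup _ (hr.filter _)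
    rw [hupd1]
    have hupd2 : PySem.Set.update L1 L2 = L1 ++ L2 := by
      refine PySem.Set.update_eq_append_of_disjoint _ _ (hp.filter _) (fun k hk2 hk1 => ?_)
      rcases List.mem_filter.mp hk1 with ⟨hkr, _⟩
      rcases List.mem_filter.mp hk2 with ⟨_, hknr⟩
      rw [(PySem.Dict.contains_iff_mem_keys _ _).mpr (by rw [hkeysr]; exact hkr)] at hknr
      exact absurd hknr (by simp)
    rw [hupd2, hkeysr]
    rw [foldA dr dp (r.map (·.1)) (L1 ++ L2) hr (fun k hk hck hmem => by
      have hkp : dp.contains k = true := ((Bool.and_eq_true _ _).mp hck).1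
      rcases List.mem_append.mp hmem with h1 | h2
      · rcases List.mem_filter.mp h1 with ⟨_, hknp⟩
        rw [hkp] at hknp
        exact absurd hknp (by simp)
      · rcases List.mem_filter.mp h2 with ⟨_, hknr⟩
        rw [(PySem.Dict.contains_iff_mem_keys _ _).mpr (by rw [hkeysr]; exact hk)] at hknr
        exact absurd hknr (by simp))]

-- ===== VERDICT (by name: the statement is the Claim_ definition above) =====
theorem find_unbalanced_atoms_spec : Claim_equal_find_unbalanced_atoms := by
  intro r p _hDom hPre
  unfold Spec_find_unbalanced_atoms
  rw [A_eq_tgt r p hPre.1 hPre.2, B_eq_tgt r p hPre.1 hPre.2]
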